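-- pv_equiv track=rewrite | github.com/swastik-nandy/Docs-chatbot | backend/rag/ingestion/parser/adapters/mdx_adapter.py | _cleanup_spacing
-- ===== SOURCE A (Python) =====
-- from typing import Dict, List, Tuple
--
-- def _cleanup_spacing(text: str) -> str:
--     lines = (text or "").splitlines()
--
--     cleaned: List[str] = []
--     blank_count = 0
--
--     for line in lines:
--         stripped = line.rstrip()
--
--         if not stripped:
--             blank_count += 1
--
--             if blank_count <= 2:
--                 cleaned.append("")
--
--             continue
--
--         blank_count = 0
--         cleaned.append(stripped)
--
--     return "\n".join(cleaned).strip() + "\n"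
-- ===== SOURCE B (Python) =====
-- def _cleanup_spacing(text: str) -> str:
--     stripped = [line.rstrip() for line in (text or "").splitlines()]
--     kept = [s for s, p1, p2 in zip(stripped, ["#"] + stripped, ["#", "#"] + stripped)
--             if s or p1 or p2]
--     return "\n".join(kept).strip() + "\n"
-- ===== Notes on version B (the rewrite author's own statement) =====
-- stated objective: alternative
-- what changed: Replaced A's stateful loop with a blank_count accumulator by a stateless list comprehension that rstrips all lines once and keeps a line iff it or one of its two predecessors (read via zips with shifted copies of the list) is nonblank.
import Mathlib
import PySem

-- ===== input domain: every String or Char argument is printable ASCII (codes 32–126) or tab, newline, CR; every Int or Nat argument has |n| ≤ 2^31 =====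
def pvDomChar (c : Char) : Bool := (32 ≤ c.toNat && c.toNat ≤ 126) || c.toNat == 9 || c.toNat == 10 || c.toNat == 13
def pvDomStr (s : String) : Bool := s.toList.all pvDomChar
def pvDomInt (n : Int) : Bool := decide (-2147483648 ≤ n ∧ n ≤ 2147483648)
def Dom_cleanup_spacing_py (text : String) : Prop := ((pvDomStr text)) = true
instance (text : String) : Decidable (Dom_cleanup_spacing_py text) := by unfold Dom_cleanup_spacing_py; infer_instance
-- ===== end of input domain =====

-- B replaces A's stateful blank-counter loop by a stateless comprehension that keeps a
-- line when it, or one of its two predecessors (looked up via zipped shifted copies), is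
-- nonblank — a different decomposition of the same cleanup (objective: alternative).


-- ===== PORT A =====
-- the loop body of A, named: state = (cleaned, blank_count)
def pvStepA (st : List String × Nat) (line : String) : List String × Nat :=
  let stripped := PySem.Str.rstrip line
  if stripped = "" then
    let b := st.2 + 1
    if b ≤ 2 then (st.1 ++ [""], b) else (st.1, b)
  else (st.1 ++ [stripped], 0)

-- literal port of _cleanup_spacing
def cleanup_spacing_py (text : String) : String :=
  let lines := PySem.Str.splitlines (if text = "" then "" else text)   -- (text or "")
  let res := lines.foldl pvStepA ([], 0)
  PySem.Str.strip (PySem.Str.join "\n" res.1) ++ "\n"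

-- ===== PORT B =====
-- the comprehension's condition, named: (s, prev1, prev2) — 's or p1 or p2'
def pvKeep (x : String × String × String) : Bool := x.1 != "" || x.2.1 != "" || x.2.2 != ""

-- literal port of Source B: rstrip all lines, zip with "#"-padded shifted copies, filter
def cleanup_spacing_py_alt (text : String) : String :=
  let stripped := (PySem.Str.splitlines (if text = "" then "" else text)).map PySem.Str.rstrip
  let kept := ((stripped.zip (("#" :: stripped).zip ("#" :: "#" :: stripped))).filter pvKeep).map (·.1)
  PySem.Str.strip (PySem.Str.join "\n" kept) ++ "\n"

-- ===== PRECONDITION & SPEC =====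
def Spec_cleanup_spacing_py (text : String) (out : String) : Prop := out = cleanup_spacing_py_alt text
instance (text : String) (out : String) : Decidable (Spec_cleanup_spacing_py text out) := by unfold Spec_cleanup_spacing_py; infer_instance

-- ===== CLAIM (what is proved, stated in full; the proofs are below) =====
def Claim_equal_cleanup_spacing_py : Prop := ∀ (text : String), Dom_cleanup_spacing_py text → Spec_cleanup_spacing_py text (cleanup_spacing_py text)

-- ===== LEMMAS AND PROOFS =====

-- canonical recursive form of the blank-capping pass, on already-rstripped lines
def pvCap : Nat → List String → List String
  | _, [] => []
  | b, s :: t => if s = "" then (if b + 1 ≤ 2 then "" :: pvCap (b + 1) t else pvCap (b + 1) t)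
                 else s :: pvCap 0 t

-- pvCap depends on the counter only through min b 2
theorem pvCap_min : ∀ (t : List String) (b b' : Nat), min b 2 = min b' 2 → pvCap b t = pvCap b' t := by
  intro t
  induction t with
  | nil => intro b b' _; rfl
  | cons s t ih =>
    intro b b' h
    by_cases hs : s = ""
    · have hrec := ih (b + 1) (b' + 1) (by omega)
      by_cases hb2 : b + 1 ≤ 2
      · have hb2' : b' + 1 ≤ 2 := by omega
        simp [pvCap, hs, hb2, hb2', hrec]
      · have hb2' : ¬ (b' + 1 ≤ 2) := by omega
        simp [pvCap, hs, hb2, hb2', hrec]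
    · simp [pvCap, hs]

-- A's fold equals pvCap on the rstripped lines
theorem foldA_eq_pvCap : ∀ (lines acc : List String) (b : Nat),
    (lines.foldl pvStepA (acc, b)).1 = acc ++ pvCap b (lines.map PySem.Str.rstrip) := by
  intro lines
  induction lines with
  | nil => intro acc b; simp [pvCap]
  | cons l t ih =>
    intro acc b
    rw [List.foldl_cons]
    by_cases hs : PySem.Str.rstrip l = ""
    · by_cases hb : b + 1 ≤ 2
      · rw [show pvStepA (acc, b) l = (acc ++ [""], b + 1) from by simp [pvStepA, hs, hb]]
        simp [ih, pvCap, hs, hb]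
      · rw [show pvStepA (acc, b) l = (acc, b + 1) from by simp [pvStepA, hs, hb]]
        simp [ih, pvCap, hs, hb]
    · rw [show pvStepA (acc, b) l = (acc ++ [PySem.Str.rstrip l], 0) from by simp [pvStepA, hs]]
      simp [ih, pvCap, hs]

-- counter value encoded by the two previous (rstripped) lines
def pvCnt (a b : String) : Nat := if a ≠ "" then 0 else if b ≠ "" then 1 else 2

-- B's zip/filter pass equals pvCap with the counter read off the two shifted heads
theorem filterB_eq_pvCap : ∀ (s : List String) (a b : String),
    ((s.zip ((a :: s).zip (b :: a :: s))).filter pvKeep).map (·.1) = pvCap (pvCnt a b) s := by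
  intro s
  induction s with
  | nil => intro a b; rfl
  | cons x t ih =>
    intro a b
    have ih' := ih x a
    simp only [List.zip_cons_cons] at ih' ⊢
    rw [List.filter_cons]
    by_cases hx : x = ""
    · subst hx
      by_cases ha : a = ""
      · by_cases hb : b = ""
        · subst ha; subst hb
          rw [show pvKeep ("", "", "") = false from by simp [pvKeep]]
          simp only [Bool.false_eq_true, if_false]
          rw [ih']
          have h23 : pvCap 2 t = pvCap 3 t := by
            apply pvCap_min; simp
          simp [pvCap, pvCnt, h23]
        · subst ha
          rw [show pvKeep ("", "", b) = true from by simp [pvKeep, hb]]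
          simp only [if_true, List.map_cons]
          rw [ih']
          simp [pvCap, pvCnt, hb]
      · rw [show pvKeep ("", a, b) = true from by simp [pvKeep, ha]]
        simp only [if_true, List.map_cons]
        rw [ih']
        simp [pvCap, pvCnt, ha]
    · rw [show pvKeep (x, a, b) = true from by simp [pvKeep, hx]]
      simp only [if_true, List.map_cons]
      rw [ih']
      simp [pvCap, pvCnt, hx]

-- ===== VERDICT (by name: the statement is the Claim_ definition above) =====
theorem cleanup_spacing_py_spec : Claim_equal_cleanup_spacing_py := by
  intro text _
  unfold Spec_cleanup_spacing_py cleanup_spacing_py cleanup_spacing_py_alt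
  simp only
  rw [foldA_eq_pvCap, filterB_eq_pvCap]
  simp [pvCnt]
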